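-- pv_equiv track=rewrite | github.com/NacaliLozano/categorizar | categorizar.py | categorizar
-- ===== SOURCE A (Python) =====
-- internacionales = ["LIL", "RAK", "VCE"]
--
-- nacionales = ["OVD", "MAD", "ZAZ"]
--
-- def categorizar(entrada):
--     resultado = "Interinsular"
--
--     for destino in entrada:
--         if destino in internacionales:
--             return "Internacional"
--         elif destino in nacionales:
--             resultado = "Nacional"
--
--     return resultado
-- ===== SOURCE B (Python) =====
-- internacionales = ["LIL", "RAK", "VCE"]
--
-- nacionales = ["OVD", "MAD", "ZAZ"]
--
-- def categorizar(entrada):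
--     if any(d in internacionales for d in entrada):
--         return "Internacional"
--     if any(d in nacionales for d in entrada):
--         return "Nacional"
--     return "Interinsular"
-- ===== Notes on version B (the rewrite author's own statement) =====
-- stated objective: simpler
-- what changed: Replaces the single loop with an early return and a mutable accumulator by two independent any() presence scans (international first, then national).
import Mathlib
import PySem

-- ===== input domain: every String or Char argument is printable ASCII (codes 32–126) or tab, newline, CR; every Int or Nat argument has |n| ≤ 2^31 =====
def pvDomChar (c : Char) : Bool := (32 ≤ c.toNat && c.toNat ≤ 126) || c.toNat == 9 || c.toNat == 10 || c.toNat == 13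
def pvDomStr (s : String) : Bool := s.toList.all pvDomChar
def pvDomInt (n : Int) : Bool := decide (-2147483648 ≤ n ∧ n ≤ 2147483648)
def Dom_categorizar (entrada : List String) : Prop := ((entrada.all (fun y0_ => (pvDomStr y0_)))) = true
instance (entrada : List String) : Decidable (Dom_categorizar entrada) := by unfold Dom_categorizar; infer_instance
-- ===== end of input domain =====

-- ===== PORT A =====
def internacionales : List String := ["LIL", "RAK", "VCE"]

def nacionales : List String := ["OVD", "MAD", "ZAZ"]

-- loop: resultado accumulator, early return on internacional
def categorizarLoop (resultado : String) : List String → String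
  | [] => resultado
  | destino :: rest =>
    if destino ∈ internacionales then "Internacional"
    else if destino ∈ nacionales then categorizarLoop "Nacional" rest
    else categorizarLoop resultado rest

def categorizar (entrada : List String) : String :=
  categorizarLoop "Interinsular" entrada

-- ===== PORT B =====
-- B replaces A's single accumulator loop with early return by two independent presence scans (objective: simpler; same cost).
def categorizar_alt (entrada : List String) : String :=
  if entrada.any (fun d => d ∈ internacionales) then "Internacional"
  else if entrada.any (fun d => d ∈ nacionales) then "Nacional"
  else "Interinsular"

-- ===== PRECONDITION & SPEC =====
def Spec_categorizar (entrada : List String) (out : String) : Prop := out = categorizar_alt entrada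
instance (entrada : List String) (out : String) : Decidable (Spec_categorizar entrada out) := by unfold Spec_categorizar; infer_instance

-- ===== CLAIM (what is proved, stated in full; the proofs are below) =====
def Claim_equal_categorizar : Prop := ∀ (entrada : List String), Dom_categorizar entrada → Spec_categorizar entrada (categorizar entrada)

-- ===== LEMMAS AND PROOFS =====

-- ===== VERDICT (by name: the statement is the Claim_ definition above) =====
-- loop characterisation: result of the loop in terms of the two scans
theorem categorizarLoop_char (resultado : String) (entrada : List String) :
    categorizarLoop resultado entrada =
      if entrada.any (fun d => d ∈ internacionales) then "Internacional"
      else if entrada.any (fun d => d ∈ nacionales) then "Nacional"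
      else resultado := by
  induction entrada generalizing resultado with
  | nil => simp [categorizarLoop]
  | cons destino rest ih =>
    simp only [categorizarLoop, List.any_cons]
    by_cases h1 : destino ∈ internacionales
    · simp [h1]
    · by_cases h2 : destino ∈ nacionales
      · simp [h1, h2, ih]
      · simp [h1, h2, ih]

theorem categorizar_spec : Claim_equal_categorizar := by
  intro entrada _
  unfold Spec_categorizar categorizar categorizar_alt
  rw [categorizarLoop_char]
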